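-- pv_equiv track=rewrite | github.com/jventura1738/interview-preparation | grids/river_sizes.py | find_river
-- ===== SOURCE A (Python) =====
-- def find_river(matrix, i, j, visited):
--     if not valid_move(matrix, i, j) or matrix[i][j] == 0:
--         return 0
--     if i*10**5+j in visited:
--         return 0
--     size = 1
--     visited.add(i*10**5+j)
--     size += find_river(matrix, i+1, j, visited)
--     size += find_river(matrix, i, j+1, visited)
--     size += find_river(matrix, i-1, j, visited)
--     size += find_river(matrix, i, j-1, visited)
--     return size
--
-- def valid_move(arr, i, j):
--     return True if 0 <= i < len(arr) and 0 <= j < len(arr[0]) else False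
-- ===== SOURCE B (Python) =====
-- def find_river(matrix, i, j, visited):
--     # Iterative DFS with an explicit stack instead of 4-way recursion.
--     # Mutates `visited` exactly like the original (adds every counted cell).
--     size = 0
--     stack = [(i, j)]
--     while stack:
--         a, b = stack.pop()
--         if not valid_move(matrix, a, b) or matrix[a][b] == 0:
--             continue
--         code = a * 10**5 + b
--         if code in visited:
--             continue
--         visited.add(code)
--         size += 1
--         # pushed so that (a+1, b) is popped first: same cell order as A
--         stack.append((a, b - 1))
--         stack.append((a - 1, b))
--         stack.append((a, b + 1))
--         stack.append((a + 1, b))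
--     return size
--
--
-- def valid_move(arr, i, j):
--     return True if 0 <= i < len(arr) and 0 <= j < len(arr[0]) else False
-- ===== Notes on version B (the rewrite author's own statement) =====
-- stated objective: alternative
-- what changed: Replaces A's 4-way recursive DFS by an iterative DFS with an explicit stack (push the start, pop/guard/count/push neighbours in a while loop), visiting cells in the same order and mutating visited identically.
-- outside the precondition, e.g. on find_river([[1, 0], [0]], 0, 0, set()): A returns 1, B returns 1; on find_river([[1, 1], [1]], 0, 0, set()): A raises IndexError, B raises IndexError
import Mathlib
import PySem

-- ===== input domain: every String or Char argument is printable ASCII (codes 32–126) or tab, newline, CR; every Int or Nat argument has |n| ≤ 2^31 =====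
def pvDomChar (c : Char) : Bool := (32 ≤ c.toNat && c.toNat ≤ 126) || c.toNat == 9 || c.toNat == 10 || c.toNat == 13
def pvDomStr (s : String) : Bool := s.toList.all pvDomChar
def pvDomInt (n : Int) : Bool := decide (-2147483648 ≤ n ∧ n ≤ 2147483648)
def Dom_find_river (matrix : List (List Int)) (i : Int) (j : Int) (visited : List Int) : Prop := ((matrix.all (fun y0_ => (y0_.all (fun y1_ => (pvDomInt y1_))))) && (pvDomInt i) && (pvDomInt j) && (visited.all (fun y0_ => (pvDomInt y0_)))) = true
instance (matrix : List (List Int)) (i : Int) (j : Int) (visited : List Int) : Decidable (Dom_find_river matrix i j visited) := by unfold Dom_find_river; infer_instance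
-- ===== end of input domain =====

-- B replaces A's 4-way recursion by an explicit stack-based DFS (same visit order, same
-- guards, same size); objective: alternative decomposition (iteration instead of recursion).
-- Both A and B mutate the caller's `visited` set identically; the theorem is about the
-- return value (the ports thread the set functionally).

-- ===== PORT A =====
-- shared helper: Python's valid_move (arr[0] is only reached when 0 <= i < len(arr),
-- so headD [] is exact: with arr = [] the first conjunct is already false)
def valid_move (arr : List (List Int)) (i : Int) (j : Int) : Bool :=
  if 0 ≤ i ∧ i < (arr.length : Int) ∧ 0 ≤ j ∧ j < ((arr.headD []).length : Int) then true else false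

-- matrix[i][j], total form; exact whenever valid_move holds and Pre_ (no row shorter
-- than row 0) holds — Python raises IndexError exactly on the inputs Pre_ excludes
def cellA (m : List (List Int)) (i : Int) (j : Int) : Int :=
  ((PySem.List.pyGet? m i).bind (fun row => PySem.List.pyGet? row j)).getD 0

-- fuel bound for the recursion: number of grid cells whose code is not yet visited
def cellCodes (m : List (List Int)) : List Int :=
  (List.range m.length).flatMap
    (fun (a : Nat) => (List.range (m.headD []).length).map (fun (b : Nat) => (a : Int) * 100000 + (b : Int)))

def unvisited (m : List (List Int)) (v : List Int) : Nat :=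
  ((cellCodes m).filter (fun c => decide (c ∉ v))).length

-- literal transliteration of A's recursive DFS; `fuel` only makes the recursion
-- structural (fuel ≥ unvisited m v never runs out, proved below)
def goA (m : List (List Int)) : Nat → Int → Int → List Int → Int × List Int
  | 0, _, _, v => (0, v)
  | fuel+1, i, j, v =>
    if valid_move m i j = false then (0, v)
    else if cellA m i j = 0 then (0, v)
    else if (i * 100000 + j) ∈ v then (0, v)
    else
      let v0 := PySem.Set.add v (i * 100000 + j)
      let r1 := goA m fuel (i+1) j v0
      let r2 := goA m fuel i (j+1) r1.2
      let r3 := goA m fuel (i-1) j r2.2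
      let r4 := goA m fuel i (j-1) r3.2
      (1 + r1.1 + r2.1 + r3.1 + r4.1, r4.2)

def find_river (matrix : List (List Int)) (i : Int) (j : Int) (visited : List Int) : Int :=
  (goA matrix (unvisited matrix visited + 1) i j visited).1

-- ===== PORT B =====
-- literal transliteration of B's stack loop (head of the list = top of the stack);
-- fuel 5*unvisited + |stack| + 1 never runs out (proved below)
def goB (m : List (List Int)) : Nat → List (Int × Int) → List Int → Int → Int × List Int
  | 0, _, v, size => (size, v)
  | _+1, [], v, size => (size, v)
  | fuel+1, (a, b) :: rest, v, size =>
    if valid_move m a b = false then goB m fuel rest v size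
    else if cellA m a b = 0 then goB m fuel rest v size
    else if (a * 100000 + b) ∈ v then goB m fuel rest v size
    else
      goB m fuel ((a+1, b) :: (a, b+1) :: (a-1, b) :: (a, b-1) :: rest)
        (PySem.Set.add v (a * 100000 + b)) (size + 1)

def find_river_alt (matrix : List (List Int)) (i : Int) (j : Int) (visited : List Int) : Int :=
  (goB matrix (5 * unvisited matrix visited + 2) [(i, j)] visited 0).1

-- ===== PRECONDITION & SPEC =====
-- Pre_ excludes matrices with a row shorter than row 0 (there the DFS can reach a cell
-- valid_move approves whose row does not extend that far, and A — like B — raises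
-- IndexError), except when the start itself is a guaranteed-safe base case (start out of
-- bounds, or its cell readable and zero, or its code already visited): then A returns 0
-- before any unsafe read.  On ragged matrices whose DFS happens never to reach a short
-- row A still returns; those stay excluded (reachability is not a closed-form condition).
def Pre_find_river (matrix : List (List Int)) (i : Int) (j : Int) (visited : List Int) : Prop :=
  (∀ row ∈ matrix, (matrix.headD []).length ≤ row.length)
  ∨ ¬ (0 ≤ i ∧ i < (matrix.length : Int) ∧ 0 ≤ j ∧ j < ((matrix.headD []).length : Int))
  ∨ (0 ≤ i ∧ i < (matrix.length : Int) ∧ 0 ≤ j ∧ j < (((matrix.headD []).length : Int)) ∧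
      j < ((matrix.getD i.toNat []).length : Int) ∧
      ((matrix.getD i.toNat []).getD j.toNat 1 = 0 ∨ (i * 100000 + j) ∈ visited))
instance (matrix : List (List Int)) (i : Int) (j : Int) (visited : List Int) : Decidable (Pre_find_river matrix i j visited) := by unfold Pre_find_river; infer_instance

def pvWitness_find_river : List (List Int) × Int × Int × List Int := ([[1, 0], [1, 1]], 0, 0, [7])

def Spec_find_river (matrix : List (List Int)) (i : Int) (j : Int) (visited : List Int) (out : Int) : Prop := out = find_river_alt matrix i j visited
instance (matrix : List (List Int)) (i : Int) (j : Int) (visited : List Int) (out : Int) : Decidable (Spec_find_river matrix i j visited out) := by unfold Spec_find_river; infer_instance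

-- ===== CLAIM (what is proved, stated in full; the proofs are below) =====
def Claim_equal_find_river : Prop := ∀ (matrix : List (List Int)) (i : Int) (j : Int) (visited : List Int), Dom_find_river matrix i j visited → Pre_find_river matrix i j visited → Spec_find_river matrix i j visited (find_river matrix i j visited)

-- ===== LEMMAS AND PROOFS =====

-- the processed cell's code is a grid code
theorem mem_cellCodes_of_valid {m : List (List Int)} {i j : Int}
    (h : valid_move m i j = true) : (i * 100000 + j) ∈ cellCodes m := by
  have hc : 0 ≤ i ∧ i < (m.length : Int) ∧ 0 ≤ j ∧ j < ((m.headD []).length : Int) := by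
    by_cases hc : 0 ≤ i ∧ i < (m.length : Int) ∧ 0 ≤ j ∧ j < ((m.headD []).length : Int)
    · exact hc
    · rw [valid_move, if_neg hc] at h; exact absurd h (by simp)
  obtain ⟨h1, h2, h3, h4⟩ := hc
  unfold cellCodes
  rw [List.mem_flatMap]
  have hi : i.toNat ∈ List.range m.length := List.mem_range.mpr (by omega)
  have hj : j.toNat ∈ List.range (m.headD []).length := List.mem_range.mpr (by omega)
  have he : i * 100000 + j = (i.toNat : Int) * 100000 + (j.toNat : Int) := by omega
  exact ⟨i.toNat, hi, List.mem_map.mpr ⟨j.toNat, hj, he.symm⟩⟩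

-- growing the visited set can only shrink `unvisited`
theorem unvisited_mono {m : List (List Int)} {v w : List Int}
    (h : ∀ c : Int, c ∈ v → c ∈ w) : unvisited m w ≤ unvisited m v := by
  simp only [unvisited, ← List.countP_eq_length_filter]
  exact List.countP_mono_left (fun c _ => by
    simp only [decide_eq_true_eq]; exact fun hw hv => hw (h c hv))

theorem unvisited_add_lt {m : List (List Int)} {v : List Int} {i j : Int}
    (hval : valid_move m i j = true) (hnm : (i * 100000 + j) ∉ v) :
    unvisited m (PySem.Set.add v (i * 100000 + j)) < unvisited m v := by
  obtain ⟨l1, l2, hsplit⟩ := List.append_of_mem (mem_cellCodes_of_valid hval)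
  simp only [unvisited, hsplit, List.filter_append, List.filter_cons,
    List.length_append]
  have hmono : ∀ l : List Int,
      (l.filter (fun c => decide (c ∉ PySem.Set.add v (i * 100000 + j)))).length ≤
      (l.filter (fun c => decide (c ∉ v))).length := by
    intro l
    simp only [← List.countP_eq_length_filter]
    refine List.countP_mono_left (fun c _ => ?_)
    simp only [decide_eq_true_eq, PySem.Set.mem_add]
    exact fun hw hv => hw (Or.inl hv)
  have h1 := hmono l1
  have h2 := hmono l2
  have hold : (decide ((i * 100000 + j) ∉ v)) = true := by simpa using hnm
  have hnew : (decide ((i * 100000 + j) ∉ PySem.Set.add v (i * 100000 + j))) = false := by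
    simp [PySem.Set.mem_add]
  rw [hold, hnew]
  simp only [Bool.false_eq_true, if_false, if_true, List.length_cons]
  omega

-- goA only ever adds to the visited set
theorem goA_grows (m : List (List Int)) : ∀ (f : Nat) (i j : Int) (v : List Int) (c : Int),
    c ∈ v → c ∈ (goA m f i j v).2 := by
  intro f
  induction f with
  | zero => intro i j v c hc; simpa [goA] using hc
  | succ f ih =>
    intro i j v c hc
    simp only [goA]
    split_ifs with h1 h2 h3
    · exact hc
    · exact hc
    · exact hc
    · exact ih _ _ _ _ (ih _ _ _ _ (ih _ _ _ _ (ih _ _ _ _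
        (by simp [PySem.Set.mem_add]; exact Or.inl hc))))

theorem unvisited_pos {m : List (List Int)} {v : List Int} {i j : Int}
    (hval : valid_move m i j = true) (hnm : (i * 100000 + j) ∉ v) : 1 ≤ unvisited m v := by
  have := unvisited_add_lt hval hnm; omega

-- with nothing left to visit every call is a base case
theorem goA_zero_ext {m : List (List Int)} {v : List Int} (i j : Int)
    (h : unvisited m v = 0) : ∀ g, goA m g i j v = (0, v) := by
  intro g
  cases g with
  | zero => rfl
  | succ g' =>
    simp only [goA]
    split_ifs with h1 h2 h3
    · rfl
    · rfl
    · rfl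
    · exfalso
      have hv : valid_move m i j = true := by
        rw [Bool.not_eq_false] at h1; exact h1
      have := unvisited_pos hv h3
      omega

-- fuel irrelevance: any fuel ≥ unvisited m v computes the same result
theorem goA_fuel_irrel (m : List (List Int)) : ∀ (f g : Nat) (i j : Int) (v : List Int),
    unvisited m v ≤ f → unvisited m v ≤ g → goA m f i j v = goA m g i j v := by
  intro f
  induction f using Nat.strong_induction_on with
  | _ f ih =>
    intro g i j v hf hg
    by_cases hz : unvisited m v = 0
    · rw [goA_zero_ext i j hz, goA_zero_ext i j hz]
    · cases f with
      | zero => omega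
      | succ f' =>
        cases g with
        | zero => omega
        | succ g' =>
          simp only [goA]
          split_ifs with h1 h2 h3
          · rfl
          · rfl
          · rfl
          · have hv : valid_move m i j = true := by
              rw [Bool.not_eq_false] at h1; exact h1
            have hlt := unvisited_add_lt hv h3
            set v0 := PySem.Set.add v (i * 100000 + j) with hv0
            have hb0f : unvisited m v0 ≤ f' := by omega
            have hb0g : unvisited m v0 ≤ g' := by omega
            have e1 : goA m f' (i+1) j v0 = goA m g' (i+1) j v0 :=
              ih f' (by omega) g' _ _ _ hb0f hb0g
            rw [e1]
            set v1 := (goA m g' (i+1) j v0).2 with hv1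
            have hm1 : unvisited m v1 ≤ unvisited m v0 :=
              unvisited_mono (fun c hc => goA_grows m g' (i+1) j v0 c hc)
            have e2 : goA m f' i (j+1) v1 = goA m g' i (j+1) v1 :=
              ih f' (by omega) g' _ _ _ (by omega) (by omega)
            rw [e2]
            set v2 := (goA m g' i (j+1) v1).2 with hv2
            have hm2 : unvisited m v2 ≤ unvisited m v1 :=
              unvisited_mono (fun c hc => goA_grows m g' i (j+1) v1 c hc)
            have e3 : goA m f' (i-1) j v2 = goA m g' (i-1) j v2 :=
              ih f' (by omega) g' _ _ _ (by omega) (by omega)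
            rw [e3]
            set v3 := (goA m g' (i-1) j v2).2 with hv3
            have hm3 : unvisited m v3 ≤ unvisited m v2 :=
              unvisited_mono (fun c hc => goA_grows m g' (i-1) j v2 c hc)
            have e4 : goA m f' i (j-1) v3 = goA m g' i (j-1) v3 :=
              ih f' (by omega) g' _ _ _ (by omega) (by omega)
            rw [e4]

-- canonical-fuel recursion; its two unfolding equations
def recA (m : List (List Int)) (i j : Int) (v : List Int) : Int × List Int :=
  goA m (unvisited m v) i j v

theorem recA_base {m : List (List Int)} {i j : Int} {v : List Int}
    (h : valid_move m i j = false ∨ cellA m i j = 0 ∨ (i * 100000 + j) ∈ v) :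
    recA m i j v = (0, v) := by
  unfold recA
  cases hn : unvisited m v with
  | zero => rfl
  | succ n =>
    simp only [goA]
    split_ifs with h1 h2 h3
    · rfl
    · rfl
    · rfl
    · exact absurd h (by tauto)

theorem recA_step {m : List (List Int)} {i j : Int} {v : List Int}
    (h1 : valid_move m i j = true) (h2 : cellA m i j ≠ 0) (h3 : (i * 100000 + j) ∉ v) :
    recA m i j v =
      (let v0 := PySem.Set.add v (i * 100000 + j)
       let r1 := recA m (i+1) j v0
       let r2 := recA m i (j+1) r1.2
       let r3 := recA m (i-1) j r2.2
       let r4 := recA m i (j-1) r3.2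
       (1 + r1.1 + r2.1 + r3.1 + r4.1, r4.2)) := by
  have hlt := unvisited_add_lt h1 h3
  obtain ⟨n, hn⟩ : ∃ n, unvisited m v = n + 1 := ⟨unvisited m v - 1, by omega⟩
  conv_lhs => rw [recA, hn]
  simp only [goA]
  rw [if_neg (by rw [h1]; simp), if_neg (by exact h2), if_neg (by exact h3)]
  set v0 := PySem.Set.add v (i * 100000 + j) with hv0
  have e1 : goA m n (i+1) j v0 = recA m (i+1) j v0 := by
    rw [recA]; exact goA_fuel_irrel m n _ (i+1) j v0 (by omega) le_rfl
  rw [e1]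
  set v1 := (recA m (i+1) j v0).2 with hv1
  have hm1 : unvisited m v1 ≤ unvisited m v0 := by
    rw [hv1, recA]; exact unvisited_mono (fun c hc => goA_grows m _ (i+1) j v0 c hc)
  have e2 : goA m n i (j+1) v1 = recA m i (j+1) v1 := by
    rw [recA]; exact goA_fuel_irrel m n _ i (j+1) v1 (by omega) le_rfl
  rw [e2]
  set v2 := (recA m i (j+1) v1).2 with hv2
  have hm2 : unvisited m v2 ≤ unvisited m v1 := by
    rw [hv2, recA]; exact unvisited_mono (fun c hc => goA_grows m _ i (j+1) v1 c hc)
  have e3 : goA m n (i-1) j v2 = recA m (i-1) j v2 := by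
    rw [recA]; exact goA_fuel_irrel m n _ (i-1) j v2 (by omega) le_rfl
  rw [e3]
  set v3 := (recA m (i-1) j v2).2 with hv3
  have hm3 : unvisited m v3 ≤ unvisited m v2 := by
    rw [hv3, recA]; exact unvisited_mono (fun c hc => goA_grows m _ (i-1) j v2 c hc)
  have e4 : goA m n i (j-1) v3 = recA m i (j-1) v3 := by
    rw [recA]; exact goA_fuel_irrel m n _ i (j-1) v3 (by omega) le_rfl
  rw [e4]

-- sequential processing of a stack by recA
def procAll (m : List (List Int)) : List (Int × Int) → List Int → Int → Int × List Int
  | [], v, size => (size, v)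
  | (a, b) :: rest, v, size =>
    let r := recA m a b v
    procAll m rest r.2 (size + r.1)

-- the stack loop computes the sequential recA processing of its stack
theorem goB_eq_procAll (m : List (List Int)) : ∀ (f : Nat) (st : List (Int × Int)) (v : List Int) (size : Int),
    5 * unvisited m v + st.length ≤ f → goB m f st v size = procAll m st v size := by
  intro f
  induction f using Nat.strong_induction_on with
  | _ f ih =>
    intro st v size hf
    cases st with
    | nil => cases f <;> rfl
    | cons hd rest =>
      obtain ⟨a, b⟩ := hd
      cases f with
      | zero => simp only [List.length_cons] at hf; omega
      | succ f' =>
        have hrest : (rest.length : Nat) + 5 * unvisited m v ≤ f' := by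
          simp only [List.length_cons] at hf; omega
        simp only [goB]
        by_cases hv : valid_move m a b = false
        · rw [if_pos hv, ih f' (by omega) rest v size (by omega)]
          simp only [procAll, recA_base (Or.inl hv)]
          norm_num
        · rw [if_neg hv]
          have hvt : valid_move m a b = true := by rw [Bool.not_eq_false] at hv; exact hv
          by_cases hc : cellA m a b = 0
          · rw [if_pos hc, ih f' (by omega) rest v size (by omega)]
            simp only [procAll, recA_base (Or.inr (Or.inl hc))]
            norm_num
          · rw [if_neg hc]
            by_cases hm : (a * 100000 + b) ∈ v
            · rw [if_pos hm, ih f' (by omega) rest v size (by omega)]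
              simp only [procAll, recA_base (Or.inr (Or.inr hm))]
              norm_num
            · rw [if_neg hm]
              have hlt := unvisited_add_lt hvt hm
              set v0 := PySem.Set.add v (a * 100000 + b) with hv0
              rw [ih f' (by omega) _ v0 (size + 1)
                (by simp only [List.length_cons]; omega)]
              simp only [procAll, recA_step hvt hc hm]
              congr 1
              ring

-- ===== VERDICT (by name: the statement is the Claim_ definition above) =====
theorem find_river_spec : Claim_equal_find_river := by
  intro matrix i j visited _ _
  unfold Spec_find_river find_river find_river_alt
  rw [goA_fuel_irrel matrix (unvisited matrix visited + 1) (unvisited matrix visited)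
    i j visited (by omega) le_rfl]
  rw [goB_eq_procAll matrix (5 * unvisited matrix visited + 2) [(i, j)] visited 0
    (by simp only [List.length_cons, List.length_nil]; omega)]
  simp only [procAll, recA]
  omega
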